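-- pv_equiv track=rewrite | github.com/eCabral87/multi-objective-optimization_implementation | mogbo.py | append_val_results
-- ===== SOURCE A (Python) =====
-- def append_val_results(dict, suggest):
--     if not dict:
--         for k in [key for key in suggest]:
--             dict[k] = [suggest[k]]
--     else:
--         for k in dict:
--             dict[k].append(suggest[k])
--     return dict
-- ===== SOURCE B (Python) =====
-- def append_val_results(dict, suggest):
--     # Recursive decomposition: build the result back-to-front over the key
--     # list `dict or suggest` (return value only; A mutates its argument).
--     def go(keys):
--         if not keys:
--             return {}
--         k = keys[0]
--         return {k: dict.get(k, []) + [suggest[k]], **go(keys[1:])}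
--     return go(list(dict or suggest))
-- ===== Notes on version B (the rewrite author's own statement) =====
-- stated objective: alternative
-- what changed: A branches on emptiness and runs two separate imperative loops that mutate the dict in place; B is a recursive decomposition that builds a fresh result dict back-to-front over the single key list `dict or suggest`, merging each entry in front of the recursively built rest (return value identical; B does not mutate its argument).
-- outside the precondition, e.g. on append_val_results({'a': [1]}, {}): A raises KeyError, B raises KeyError
import Mathlib
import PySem

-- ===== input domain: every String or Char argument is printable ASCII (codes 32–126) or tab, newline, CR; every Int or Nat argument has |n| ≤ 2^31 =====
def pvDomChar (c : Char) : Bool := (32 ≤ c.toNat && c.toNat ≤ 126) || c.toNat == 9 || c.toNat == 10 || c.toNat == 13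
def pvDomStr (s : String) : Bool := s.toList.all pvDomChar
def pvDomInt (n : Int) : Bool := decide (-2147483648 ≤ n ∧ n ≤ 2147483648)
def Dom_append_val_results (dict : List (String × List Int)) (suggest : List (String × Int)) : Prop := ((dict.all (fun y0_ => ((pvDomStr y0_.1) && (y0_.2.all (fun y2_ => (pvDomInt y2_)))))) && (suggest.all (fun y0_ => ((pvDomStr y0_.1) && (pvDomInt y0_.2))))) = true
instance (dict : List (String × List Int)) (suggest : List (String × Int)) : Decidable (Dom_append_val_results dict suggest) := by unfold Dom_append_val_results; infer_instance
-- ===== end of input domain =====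

-- B replaces A's empty/non-empty branch with its two mutating loops by a recursive helper that builds the result dict back-to-front over the key list `dict or suggest`; equivalence is about the RETURN value only (A mutates its argument, B does not).


-- ===== PORT A =====
-- A: if the dict is empty, set dict[k] = [suggest[k]] for each key of suggest;
-- otherwise append suggest[k] to dict[k] for each key of dict (in-place in Python).
def append_val_results (dict : List (String × List Int)) (suggest : List (String × Int)) : List (String × List Int) :=
  let sd : PySem.Dict String Int := PySem.Dict.mk suggest
  if dict = [] then
    ((suggest.map Prod.fst).foldl
      (fun d k => d.insert k [sd.getD k 0]) (PySem.Dict.mk dict)).items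
  else
    -- dict[k].append(x) rewrites the value at k in place, keeping its position
    ((dict.map Prod.fst).foldl
      (fun d k => d.modify k [] (fun v => v ++ [sd.getD k 0])) (PySem.Dict.mk dict)).items

-- ===== PORT B =====
-- B's recursive helper go(keys): {} on [], else {k: dict.get(k,[]) + [suggest[k]], **go(rest)}
-- ({k: v, **rest} = a dict starting as {k: v} into which rest's entries are inserted).
def pvGoB (dd : PySem.Dict String (List Int)) (sd : PySem.Dict String Int) :
    List String → PySem.Dict String (List Int)
  | [] => PySem.Dict.empty
  | k :: rest =>
    ((pvGoB dd sd rest).items).foldl (fun d p => d.insert p.1 p.2)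
      (PySem.Dict.mk [(k, dd.getD k [] ++ [sd.getD k 0])])

def append_val_results_alt (dict : List (String × List Int)) (suggest : List (String × Int)) : List (String × List Int) :=
  let dd : PySem.Dict String (List Int) := PySem.Dict.mk dict
  let sd : PySem.Dict String Int := PySem.Dict.mk suggest
  (pvGoB dd sd (if dict = [] then suggest.map Prod.fst else dict.map Prod.fst)).items

-- ===== PRECONDITION & SPEC =====
-- Pre_ excludes association lists with duplicate keys (they do not represent a Python
-- dict) and, when dict is non-empty, inputs with a dict key missing from suggest,
-- on which A (and B) raise KeyError.
def Pre_append_val_results (dict : List (String × List Int)) (suggest : List (String × Int)) : Prop :=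
  (dict.map Prod.fst).Nodup ∧ (suggest.map Prod.fst).Nodup ∧
  (dict ≠ [] → ∀ k ∈ dict.map Prod.fst, k ∈ suggest.map Prod.fst)
instance (dict : List (String × List Int)) (suggest : List (String × Int)) : Decidable (Pre_append_val_results dict suggest) := by unfold Pre_append_val_results; infer_instance
def pvWitness_append_val_results : (List (String × List Int)) × (List (String × Int)) :=
  ([("a", [1]), ("b", [])], [("a", 5), ("b", 6), ("c", 7)])
def Spec_append_val_results (dict : List (String × List Int)) (suggest : List (String × Int)) (out : List (String × List Int)) : Prop := out = append_val_results_alt dict suggest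
instance (dict : List (String × List Int)) (suggest : List (String × Int)) (out : List (String × List Int)) : Decidable (Spec_append_val_results dict suggest out) := by unfold Spec_append_val_results; infer_instance

-- ===== CLAIM (what is proved, stated in full; the proofs are below) =====
def Claim_equal_append_val_results : Prop := ∀ (dict : List (String × List Int)) (suggest : List (String × Int)), Dom_append_val_results dict suggest → Pre_append_val_results dict suggest → Spec_append_val_results dict suggest (append_val_results dict suggest)

-- ===== LEMMAS AND PROOFS =====

-- with nodup keys, a key occurring in the list filters to exactly itself
theorem filter_eq_self_of_nodup (ks : List String) (c : String) (hnd : ks.Nodup)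
    (hc : c ∈ ks) : ks.filter (fun k => k == c) = [c] := by
  rw [List.filter_beq, List.count_eq_one_of_mem hnd hc]
  rfl

-- A's modify-loop over the dict's own keys updates each entry pointwise
theorem itemsA (dict : List (String × List Int)) (g : String → Int)
    (hnd : (dict.map Prod.fst).Nodup) :
    ((dict.map Prod.fst).foldl
      (fun d k => d.modify k [] (fun v => v ++ [g k])) (PySem.Dict.mk dict)).items
    = (dict.map Prod.fst).map
        (fun k => (k, (PySem.Dict.mk dict).getD k [] ++ [g k])) := by
  set ks := dict.map Prod.fst with hks
  have hfold : ks.foldl (fun d k => d.modify k [] (fun v => v ++ [g k])) (PySem.Dict.mk dict)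
      = (ks.map (fun k => (k, g k))).foldl
          (fun d p => d.modify p.1 [] (fun v => v ++ [p.2])) (PySem.Dict.mk dict) := by
    simp only [List.foldl_map]
  rw [hfold]
  clear hfold
  set R := (ks.map (fun k => (k, g k))).foldl
      (fun d p => d.modify p.1 [] (fun v => v ++ [p.2])) (PySem.Dict.mk dict) with hR
  have hkeys : R.keys = ks := by
    rw [hR, PySem.Dict.keys_foldl_modify_key]
    have h1 : List.map Prod.fst (List.map (fun k => (k, g k)) ks) = ks := by
      rw [List.map_map]
      have hcomp : (Prod.fst ∘ fun k : String => (k, g k)) = id := by funext k; rfl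
      rw [hcomp, List.map_id]
    have h2 : (PySem.Dict.mk dict).keys = ks := by simp [hks]
    rw [h1, h2, PySem.Set.update_eq_append_filter]
    have : (PySem.Set.ofList ks).filter (fun y => !(PySem.Set.contains ks y)) = [] := by
      apply List.filter_eq_nil_iff.mpr
      intro y hy
      have hy' : y ∈ ks := (PySem.Set.mem_ofList ks y).mp hy
      simp [PySem.Set.contains_eq_listContains, hy']
    rw [this, List.append_nil]
  have hndR : R.keys.Nodup := by rw [hkeys]; exact hnd
  rw [PySem.Dict.items_eq_map_keys R hndR [], hkeys]
  apply List.map_congr_left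
  intro c hc
  have hget : R.getD c [] = (PySem.Dict.mk dict).getD c [] ++ [g c] := by
    rw [hR, PySem.Dict.getD_foldl_modify_append]
    congr 1
    rw [List.filter_map]
    have : ((fun p => p.1 == c) ∘ (fun k => (k, g k))) = (fun k => k == c) := rfl
    rw [this, filter_eq_self_of_nodup ks c hnd hc]
    rfl
  rw [hget]

-- B's recursive builder over distinct keys produces exactly the pointwise map
theorem itemsGoB (dd : PySem.Dict String (List Int)) (sd : PySem.Dict String Int)
    (ks : List String) (hnd : ks.Nodup) :
    (pvGoB dd sd ks).items = ks.map (fun k => (k, dd.getD k [] ++ [sd.getD k 0])) := by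
  induction ks with
  | nil => rfl
  | cons k rest ih =>
    have hk : k ∉ rest := (List.nodup_cons.mp hnd).1
    have hndr : rest.Nodup := (List.nodup_cons.mp hnd).2
    simp only [pvGoB]
    rw [ih hndr]
    have hfresh := PySem.Dict.items_foldl_insert_fresh
      (l := rest.map (fun k => (k, dd.getD k [] ++ [sd.getD k 0])))
      (k := Prod.fst) (v := Prod.snd)
      (d := PySem.Dict.mk [(k, dd.getD k [] ++ [sd.getD k 0])])
      (by
        intro a ha
        obtain ⟨x, hx, rfl⟩ := List.mem_map.mp ha
        simp only [PySem.Dict.contains_mk]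
        simp
        intro h; exact absurd (h ▸ hx) hk)
      (by
        have : (rest.map (fun k => (k, dd.getD k [] ++ [sd.getD k 0]))).map Prod.fst = rest := by
          rw [List.map_map]
          have : (Prod.fst ∘ fun k : String => (k, dd.getD k [] ++ [sd.getD k 0])) = id := by
            funext a; rfl
          rw [this, List.map_id]
        rw [this]; exact hndr)
    have hfn : (fun (d : PySem.Dict String (List Int)) (p : String × List Int) => d.insert p.1 p.2)
        = (fun d a => d.insert a.1 a.2) := rfl
    rw [hfn] at *
    rw [hfresh]
    simp [List.map_cons]

-- ===== VERDICT (by name: the statement is the Claim_ definition above) =====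
theorem append_val_results_spec : Claim_equal_append_val_results := by
  intro dict suggest _ hpre
  obtain ⟨hd, hs, himp⟩ := hpre
  unfold Spec_append_val_results append_val_results append_val_results_alt
  by_cases hdict : dict = []
  · subst hdict
    simp only [if_true]
    rw [itemsGoB _ _ _ hs]
    have he := PySem.Dict.items_foldl_insert_fresh
      (l := suggest.map Prod.fst) (k := fun a => a)
      (v := fun a => [(PySem.Dict.mk suggest).getD a 0])
      (d := PySem.Dict.mk ([] : List (String × List Int)))
      (by intro a _; exact PySem.Dict.contains_empty a)
      (by simpa using hs)
    simpa using he
  · simp only [if_neg hdict]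
    rw [itemsGoB _ _ _ hd, itemsA dict (fun k => (PySem.Dict.mk suggest).getD k 0) hd]
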